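-- pv_equiv track=rewrite | github.com/guts-yang/PDF-Title-Extractor-Renamer | pdf_title_renamer.py | extract_keywords_from_title
-- ===== SOURCE A (Python) =====
-- class Config:
--     # 非法字符替换映射
--     ILLEGAL_CHARS = {'<': '(', '>': ')', ':': ' -', '"': '', '/': '-', '\\': '-', '|': '-', '?': '', '*': ''}
--
--     # PDF处理配置
--     MAX_TITLE_LENGTH = 150
--     MAX_PAGES_TO_CHECK = 3
--     MIN_TITLE_LENGTH = 5
--
--     # 内容提取区域配置
--     HEADER_REGION = (0.0, 0.0, 1.0, 0.15)  # 页眉区域 (左, 下, 右, 上)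
--     CONTENT_REGION = (0.1, 0.1, 0.9, 0.8)  # 正文区域
--     FOOTER_REGION = (0.0, 0.8, 1.0, 1.0)  # 页脚区域
--
--     # 关键词配置 - 用于标题验证和机构提取
--     TITLE_KEYWORDS = [
--         'research', 'study', 'investigation', 'analysis', 'method', 'approach',
--         'algorithm', 'model', 'system', 'framework', 'technique', 'solution',
--         'theory', 'design', 'implementation', 'evaluation', 'comparison'
--     ]
--
--     INSTITUTION_KEYWORDS = [
--         'university', 'institute', 'lab', 'laboratory', 'school', 'college',
--         'department', 'center', 'faculty', 'academy', 'research', 'institute of',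
--         'university of', 'dept.', 'school of', 'college of'
--     ]
--
--     # 文件名格式配置
--     DEFAULT_NAME_FORMAT = "未识别文件_{timestamp}"
--
--     # 论文标准命名格式 - 仅包含标题格式
--     PAPER_NAMING_FORMAT = "{title}"
--
--     # 年份模式（用于从文件名或文本中提取年份）
--     YEAR_PATTERNS = [
--         r'\b(19|20)\d{2}\b',  # 19xx或20xx格式的年份
--         r'\((19|20)\d{2}\)',  # (19xx)或(20xx)格式的年份
--     ]
--
--     # 作者模式（用于从文件名或文本中提取作者）
--     AUTHOR_PATTERNS = [
--         r'([A-Z][a-z]+)\s+et\s+al',  # 姓 et al 格式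
--         r'([A-Z][a-z]+(?:,\s*[A-Z][a-z]+)*)',  # 姓1, 姓2 格式
--     ]
--
--     # 关键词提取配置
--     MAX_KEYWORDS_LENGTH = 30
--     KEYWORD_MIN_LENGTH = 3
--
--     # 跳过的文件模式
--     SKIP_PATTERNS = [
--         r'^\.',  # 隐藏文件
--         r'^~\$',  # 临时文件
--         r'^Thumbs\.db$',  # Windows缩略图缓存
--         r'^desktop\.ini$'  # Windows配置文件
--     ]
--
-- def extract_keywords_from_title(title):
--     """从标题中提取关键词（简洁版本的标题）"""
--     if not title:
--         return "Untitled"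
--
--     # 转换为小写并分割为单词
--     words = title.lower().split()
--
--     # 过滤常见的停用词和太短的词
--     stop_words = {'the', 'a', 'an', 'and', 'or', 'but', 'in', 'on', 'at', 'to', 'for', 'of', 'with', 'by', 'from', 'as', 'is', 'are', 'was', 'were', 'be'}
--     keywords = [word for word in words if word not in stop_words and len(word) >= Config.KEYWORD_MIN_LENGTH]
--
--     # 限制关键词数量和长度
--     result = ""
--     current_length = 0
--     for word in keywords[:5]:  # 最多取5个关键词
--         if current_length + len(word) <= Config.MAX_KEYWORDS_LENGTH:
--             if result:
--                 result += '_'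
--             result += word
--             current_length += len(word) + 1  # +1 for the underscore
--         else:
--             break
--
--     # 确保至少有一个关键词
--     if not result:
--         # 如果没有合适的关键词，返回标题的前几个单词
--         result = '_'.join(words[:3])[:Config.MAX_KEYWORDS_LENGTH]
--
--     return result
-- ===== SOURCE B (Python) =====
-- STOP_WORDS = frozenset({'the', 'a', 'an', 'and', 'or', 'but', 'in', 'on', 'at', 'to', 'for', 'of', 'with', 'by', 'from', 'as', 'is', 'are', 'was', 'were', 'be'})
--
--
-- def _pick(ws, slots, used):
--     """Fused pass over the raw words: skip stop/short words without using a
--     slot, stop at the first keyword that would push the joined length past 30,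
--     otherwise take it (at most `slots` keywords)."""
--     chosen = []
--     for w in ws:
--         if slots == 0:
--             break
--         if w in STOP_WORDS or len(w) < 3:
--             continue
--         if used + len(w) > 30:
--             break
--         chosen.append(w)
--         slots -= 1
--         used += len(w) + 1
--     return chosen
--
--
-- def extract_keywords_from_title(title):
--     """Single fused pass over the words (filter + budget + 5-slot cap at once,
--     no intermediate keywords list), joined once at the end."""
--     if not title:
--         return "Untitled"
--     words = title.lower().split()
--     result = '_'.join(_pick(words, 5, 0))
--     if not result:
--         result = '_'.join(words[:3])[:30]
--     return result
-- ===== Notes on version B (the rewrite author's own statement) =====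
-- stated objective: alternative
-- what changed: A's staged pipeline (filter comprehension into a keywords list, slice to 5, then an imperative accumulate-and-break loop mutating a string and a length counter) is replaced by one fused recursive pass over the raw words that skips non-keywords, tracks a 5-slot cap and a 30-char budget, and returns the chosen words as a list joined once at the end.
import Mathlib
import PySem

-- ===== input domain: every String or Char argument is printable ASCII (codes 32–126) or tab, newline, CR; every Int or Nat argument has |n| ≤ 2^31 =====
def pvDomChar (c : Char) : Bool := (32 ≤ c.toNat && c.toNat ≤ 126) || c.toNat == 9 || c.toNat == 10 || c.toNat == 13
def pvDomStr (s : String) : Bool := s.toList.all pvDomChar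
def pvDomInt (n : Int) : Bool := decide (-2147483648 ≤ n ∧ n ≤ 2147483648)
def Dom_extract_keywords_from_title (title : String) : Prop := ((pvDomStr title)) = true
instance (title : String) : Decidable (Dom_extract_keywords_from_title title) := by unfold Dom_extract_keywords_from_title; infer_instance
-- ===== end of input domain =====

-- B fuses A's staged filter + accumulate-and-break string loop into one recursive pass
-- over the raw words (slot cap + length budget), joining the chosen words once at the end.

-- shared constant: the Python stop-word set literal (membership test only)
def pvStopWords : List (List Char) :=
  ["the", "a", "an", "and", "or", "but", "in", "on", "at", "to", "for", "of", "with",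
   "by", "from", "as", "is", "are", "was", "were", "be"].map String.toList

-- ===== PORT A =====
-- A's loop: state (result, current_length); breaks at the first word that would overflow 30
def pvALoop : List (List Char) → List Char × Int → List Char × Int
  | [], st => st
  | w :: rest, (res, cl) =>
    if cl + PySem.Chars.len w ≤ 30 then
      pvALoop rest ((if res ≠ [] then res ++ '_' :: w else w), cl + PySem.Chars.len w + 1)
    else (res, cl)

def extract_keywords_from_title (title : String) : String :=
  if title = "" then "Untitled" else
  let words := PySem.Chars.split₀ (PySem.Chars.lower title.toList)
  let keywords := words.filter (fun w => !(pvStopWords.contains w) && decide (3 ≤ PySem.Chars.len w))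
  let result := (pvALoop (keywords.take 5) ([], 0)).1
  let result := if result = [] then PySem.List.slice (PySem.Chars.join ['_'] (words.take 3)) none (some 30) else result
  String.ofList result

-- ===== PORT B =====
-- Source B's _pick: skip stop/short words, stop at the first overflowing keyword, else take it
def pvBPick : List (List Char) → Nat → Int → List (List Char)
  | [], _, _ => []
  | _ :: _, 0, _ => []
  | w :: rest, Nat.succ s, used =>
    if pvStopWords.contains w || decide (PySem.Chars.len w < 3) then pvBPick rest (s + 1) used
    else if decide (used + PySem.Chars.len w > 30) then []
    else w :: pvBPick rest s (used + PySem.Chars.len w + 1)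

def extract_keywords_from_title_alt (title : String) : String :=
  if title = "" then "Untitled" else
  let words := PySem.Chars.split₀ (PySem.Chars.lower title.toList)
  let result := PySem.Chars.join ['_'] (pvBPick words 5 0)
  let result := if result = [] then PySem.List.slice (PySem.Chars.join ['_'] (words.take 3)) none (some 30) else result
  String.ofList result

-- ===== PRECONDITION & SPEC =====
def Spec_extract_keywords_from_title (title : String) (out : String) : Prop := out = extract_keywords_from_title_alt title
instance (title : String) (out : String) : Decidable (Spec_extract_keywords_from_title title out) := by unfold Spec_extract_keywords_from_title; infer_instance

-- ===== CLAIM (what is proved, stated in full; the proofs are below) =====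
def Claim_equal_extract_keywords_from_title : Prop := ∀ (title : String), Dom_extract_keywords_from_title title → Spec_extract_keywords_from_title title (extract_keywords_from_title title)

-- ===== LEMMAS AND PROOFS =====

-- proof-only helper: pvBPick with the filtering already done (no skip branch)
def pvPick : List (List Char) → Nat → Int → List (List Char)
  | [], _, _ => []
  | _ :: _, 0, _ => []
  | w :: rest, Nat.succ s, used =>
    if used + PySem.Chars.len w ≤ 30 then w :: pvPick rest s (used + PySem.Chars.len w + 1) else []

def pvKeep (w : List Char) : Bool := !(pvStopWords.contains w) && decide (3 ≤ PySem.Chars.len w)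

-- the fused pass's skip test is the negation of the filter predicate
theorem pv_skip_eq (w : List Char) :
    (pvStopWords.contains w || decide (PySem.Chars.len w < 3)) = !(pvKeep w) := by
  simp only [pvKeep, Bool.not_and, Bool.not_not, PySem.Chars.len_eq, ← decide_not, not_le]
  rfl

-- B's fused pass equals the staged pick over the filtered list
theorem pv_fuse (ws : List (List Char)) : ∀ (slots : Nat) (used : Int),
    pvBPick ws slots used = pvPick (ws.filter pvKeep) slots used := by
  induction ws with
  | nil => intro slots used; cases slots <;> simp [pvBPick, pvPick]
  | cons w rest ih =>
    intro slots used
    cases hk : pvKeep w with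
    | true =>
      have hskip : (pvStopWords.contains w || decide (PySem.Chars.len w < 3)) = false := by
        rw [pv_skip_eq, hk]; rfl
      cases slots with
      | zero =>
        rw [List.filter_cons, if_pos (by simp [hk])]
        rfl
      | succ s =>
        rw [List.filter_cons, if_pos (by simp [hk])]
        simp only [pvBPick, pvPick, hskip, Bool.false_eq_true, reduceIte, decide_eq_true_eq, ih]
        split_ifs with h1 h2 <;> first | rfl | omega
    | false =>
      have hskip : (pvStopWords.contains w || decide (PySem.Chars.len w < 3)) = true := by
        rw [pv_skip_eq, hk]; rfl
      cases slots with
      | zero =>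
        rw [List.filter_cons, if_neg (by simp [hk])]
        cases hf : List.filter pvKeep rest <;> rfl
      | succ s =>
        rw [List.filter_cons, if_neg (by simp [hk])]
        simp only [pvBPick, hskip, reduceIte]
        exact ih _ _

-- join over a snoc: appending one more word adds a separator unless the prefix was empty
theorem pv_join_snoc (pre : List (List Char)) (w : List Char) :
    PySem.Chars.join ['_'] (pre ++ [w]) =
      if pre = [] then w else PySem.Chars.join ['_'] pre ++ '_' :: w := by
  induction pre with
  | nil => simp [PySem.Chars.join_singleton]
  | cons x xs ih =>
    cases xs with
    | nil => simp [PySem.Chars.join_cons_cons, PySem.Chars.join_singleton]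
    | cons y ys =>
      have ih' : PySem.Chars.join ['_'] ((y :: ys) ++ [w])
          = PySem.Chars.join ['_'] (y :: ys) ++ '_' :: w := by
        rw [ih, if_neg (by simp)]
      simp only [List.cons_append] at ih' ⊢
      rw [if_neg (by simp), PySem.Chars.join_cons_cons, PySem.Chars.join_cons_cons, ih']
      simp

theorem pv_join_ne_nil (pre : List (List Char)) (hne : ∀ w ∈ pre, w ≠ []) (h : pre ≠ []) :
    PySem.Chars.join ['_'] pre ≠ [] := by
  cases pre with
  | nil => simp at h
  | cons x xs =>
    cases xs with
    | nil =>
      rw [PySem.Chars.join_singleton]; exact hne x (by simp)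
    | cons y ys =>
      rw [PySem.Chars.join_cons_cons]
      simp

-- main invariant: A's loop over the first `slots` keywords, started from the join of an
-- accepted prefix, computes the join of that prefix extended by pvPick's choice
theorem pv_loop_pick (ks : List (List Char)) :
    ∀ (slots : Nat) (pre : List (List Char)) (U : Int),
    (∀ w ∈ pre, w ≠ []) → (∀ w ∈ ks, w ≠ []) →
    (pvALoop (ks.take slots) (PySem.Chars.join ['_'] pre, U)).1
      = PySem.Chars.join ['_'] (pre ++ pvPick ks slots U) := by
  induction ks with
  | nil => intro slots pre U _ _; cases slots <;> simp [pvALoop, pvPick]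
  | cons w rest ih =>
    intro slots pre U hpre hks
    cases slots with
    | zero => simp [pvALoop, pvPick]
    | succ s =>
      have hw : w ≠ [] := hks w (by simp)
      by_cases hfit : U + PySem.Chars.len w ≤ 30
      · have hres : (if PySem.Chars.join ['_'] pre ≠ [] then PySem.Chars.join ['_'] pre ++ '_' :: w
              else w) = PySem.Chars.join ['_'] (pre ++ [w]) := by
          by_cases hp : pre = []
          · subst hp; rw [pv_join_snoc, if_pos rfl]; simp [PySem.Chars.join_nil]
          · rw [if_pos (pv_join_ne_nil pre hpre hp), pv_join_snoc, if_neg hp]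
        have hpre' : ∀ x ∈ pre ++ [w], x ≠ [] := by
          intro x hx; rcases List.mem_append.mp hx with h | h
          · exact hpre x h
          · simp at h; subst h; exact hw
        have key := ih s (pre ++ [w]) (U + PySem.Chars.len w + 1) hpre'
          (fun x hx => hks x (by simp [hx]))
        simp only [List.take_succ_cons, pvALoop, if_pos hfit, hres, pvPick, key,
          List.append_assoc, List.singleton_append]
      · simp only [List.take_succ_cons, pvALoop, pvPick, if_neg hfit, List.append_nil]

theorem pv_keywords_ne_nil (words : List (List Char)) :
    ∀ w ∈ words.filter pvKeep, w ≠ [] := by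
  intro w hw
  have := (List.mem_filter.mp hw).2
  simp only [pvKeep, Bool.and_eq_true, decide_eq_true_eq, PySem.Chars.len_eq] at this
  intro hnil
  subst hnil
  simp at this

-- ===== VERDICT (by name: the statement is the Claim_ definition above) =====
theorem extract_keywords_from_title_spec : Claim_equal_extract_keywords_from_title := by
  intro title _
  unfold Spec_extract_keywords_from_title extract_keywords_from_title extract_keywords_from_title_alt
  by_cases ht : title = ""
  · simp [ht]
  · rw [if_neg ht, if_neg ht]
    have hfilter : ((PySem.Chars.split₀ (PySem.Chars.lower title.toList)).filter
        (fun w => !(pvStopWords.contains w) && decide (3 ≤ PySem.Chars.len w)))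
        = (PySem.Chars.split₀ (PySem.Chars.lower title.toList)).filter pvKeep := rfl
    have key := pv_loop_pick ((PySem.Chars.split₀ (PySem.Chars.lower title.toList)).filter pvKeep)
      5 [] 0 (by simp) (pv_keywords_ne_nil _)
    simp only [PySem.Chars.join_nil, List.nil_append] at key
    dsimp only
    rw [hfilter, key, pv_fuse]
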